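-- pv_equiv track=rewrite | github.com/renzildourado/Algorithms_Independent_Study_Class | gridland_metro.py | gridlandMetro
-- ===== SOURCE A (Python) =====
-- def gridlandMetro(n, m, k, track):
--     # Complete this function
--
--     track = sorted(track, key = lambda x : (x[0], x[1]))
--     i = 0
--     sum = 0
--     while i < len(track):
--         stack = []
--         row = track[i][0]
--         stack.append((track[i][1], track[i][2]))
--         i += 1
--
--         while i <len(track) and track[i][0] == row:
--             current = (track[i][1], track[i][2])
--             stack_top = stack.pop()
--
--             if stack_top[0] <= current[0]<= stack_top[1] or stack_top[1] >= current[1] >= stack_top[0]: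
--                 if current[1] > stack_top[1]:
--                     new_tup = (stack_top[0], current[1])
--                     stack.append(new_tup)
--
--                 else:
--                     stack.append(stack_top)
--
--             else:
--                 stack.append(stack_top)
--                 stack.append(current)
--
--             i +=1
--
--         for elements in stack:
--             sum += elements[1] - elements[0] + 1
--
--
--     result = (m*n) - sum
--
--     return result
-- ===== SOURCE B (Python) =====
-- def _blocks(ivs):
--     # repeatedly peel one maximal block off the front of the start-sorted list
--     blocks = []
--     while ivs:
--         (s, e), rest = ivs[0], ivs[1:]
--         i = 0
--         while i < len(rest):
--             c1, c2 = rest[i]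
--             if c1 <= e or (s <= c2 <= e):
--                 if c2 > e:
--                     e = c2
--                 i += 1
--             else:
--                 break
--         blocks.append((s, e))
--         ivs = rest[i:]
--     return blocks
--
--
-- def gridlandMetro(n, m, k, track):
--     # group intervals by row in one pass, collect every row's blocks, subtract their cells
--     by_row = {}
--     for r, c1, c2 in track:
--         by_row.setdefault(r, []).append((c1, c2))
--     blocks = []
--     for ivs in by_row.values():
--         blocks.extend(_blocks(sorted(ivs, key=lambda iv: iv[0])))
--     return n * m - sum(e - s + 1 for s, e in blocks)
-- ===== Notes on version B (the rewrite author's own statement) =====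
-- stated objective: alternative
-- what changed: A sorts the whole track by (row, start) and walks it with index-driven nested while loops, merging each row's intervals on an explicit pop/push stack and accumulating the sum inline; B instead groups intervals by row into a dict in one pass, peels each start-sorted row into maximal blocks (no stack, simplified overlap test justified by the sorted starts), materialises the flat block list, and subtracts its total length from n*m - the same merge semantics in a different decomposition and data structures.
import Mathlib
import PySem

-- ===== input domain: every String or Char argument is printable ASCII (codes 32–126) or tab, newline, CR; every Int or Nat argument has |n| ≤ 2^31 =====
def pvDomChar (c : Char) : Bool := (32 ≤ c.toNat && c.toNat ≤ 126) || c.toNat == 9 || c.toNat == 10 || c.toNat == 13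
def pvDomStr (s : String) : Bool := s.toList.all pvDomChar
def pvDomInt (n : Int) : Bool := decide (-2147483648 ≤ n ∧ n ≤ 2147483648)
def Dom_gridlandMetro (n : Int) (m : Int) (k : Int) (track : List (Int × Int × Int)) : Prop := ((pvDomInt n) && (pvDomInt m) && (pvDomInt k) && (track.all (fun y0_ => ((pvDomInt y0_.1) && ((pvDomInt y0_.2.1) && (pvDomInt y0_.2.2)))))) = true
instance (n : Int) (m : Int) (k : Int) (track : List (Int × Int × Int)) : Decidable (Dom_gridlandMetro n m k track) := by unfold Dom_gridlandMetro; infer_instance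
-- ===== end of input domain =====

-- B replaces A's global (row, start) sort + index-driven nested while loops + pop/push merge
-- stack + inline sum by a one-pass group-by-row dict and a per-row recursive block peeling that
-- materialises the flat block list and sums it at the end (objective: alternative).

-- ===== PORT A =====
-- A's inner merge step on the stack (the stack top is kept at the HEAD of the list here; A keeps
-- it at the end — only push/pop of the top and the order-independent final sum observe the stack,
-- so the representation is faithful). The [] branch is unreachable: A only pops after a push.
def pvAStep (stack : List (Int × Int)) (cur : Int × Int) : List (Int × Int) :=
  match stack with
  | [] => [cur]
  | top :: rest =>
    if (top.1 ≤ cur.1 ∧ cur.1 ≤ top.2) ∨ (cur.2 ≤ top.2 ∧ top.1 ≤ cur.2) then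
      if top.2 < cur.2 then (top.1, cur.2) :: rest else top :: rest
    else cur :: top :: rest

-- A's inner 'while i < len(track) and track[i][0] == row' loop: returns the final stack and
-- the unconsumed suffix of the sorted list.
def pvInnerA (row : Int) (stack : List (Int × Int)) : List (Int × Int × Int) → List (Int × Int) × List (Int × Int × Int)
  | [] => (stack, [])
  | t :: rest =>
    if t.1 = row then pvInnerA row (pvAStep stack (t.2.1, t.2.2)) rest else (stack, t :: rest)

-- termination measure for A's outer loop (cited in its decreasing_by)
theorem pvInnerA_len (row : Int) (stack : List (Int × Int)) (l : List (Int × Int × Int)) :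
    (pvInnerA row stack l).2.length ≤ l.length := by
  induction l generalizing stack with
  | nil => simp [pvInnerA]
  | cons t rest ih =>
    simp only [pvInnerA]
    split
    · exact le_trans (ih _) (by simp)
    · simp

-- A's outer 'while i < len(track)' loop, accumulating 'sum'
def pvOuterA : List (Int × Int × Int) → Int
  | [] => 0
  | t :: rest =>
    let pr := pvInnerA t.1 [(t.2.1, t.2.2)] rest
    pr.1.foldl (fun s e => s + (e.2 - e.1 + 1)) 0 + pvOuterA pr.2
termination_by l => l.length
decreasing_by
  have := pvInnerA_len t.1 [(t.2.1, t.2.2)] rest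
  simp only [List.length_cons]
  omega

def gridlandMetro (n : Int) (m : Int) (k : Int) (track : List (Int × Int × Int)) : Int :=
  m * n - pvOuterA (PySem.List.sorted2 track (fun t => t.1) (fun t => t.2.1))

-- ===== PORT B =====
-- B's inner while over _blocks' rest: consume intervals while they merge into the current
-- block (s, e), returning the final e and the unconsumed remainder rest[i:]
-- (B's outer 'while ivs' peeling loop is pvBlocks below, as structural recursion)
def pvConsume : Int → Int → List (Int × Int) → Int × List (Int × Int)
  | _, e, [] => (e, [])
  | s, e, (c1, c2) :: rest =>
    if c1 ≤ e ∨ (s ≤ c2 ∧ c2 ≤ e) then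
      pvConsume s (if e < c2 then c2 else e) rest
    else (e, (c1, c2) :: rest)

-- termination measure for _blocks' recursion (cited in its decreasing_by)
theorem pvConsume_len (s e : Int) (l : List (Int × Int)) :
    (pvConsume s e l).2.length ≤ l.length := by
  induction l generalizing e with
  | nil => simp [pvConsume]
  | cons c rest ih =>
    obtain ⟨c1, c2⟩ := c
    simp only [pvConsume]
    split
    · exact le_trans (ih _) (by simp)
    · simp

-- B's _blocks: repeatedly peel one maximal block off the front
def pvBlocks : List (Int × Int) → List (Int × Int)
  | [] => []
  | (s, e) :: rest =>
    let pr := pvConsume s e rest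
    (s, pr.1) :: pvBlocks pr.2
termination_by l => l.length
decreasing_by
  have := pvConsume_len s e rest
  simp only [List.length_cons]
  omega

-- B's grouping loop: by_row.setdefault(r, []).append((c1, c2))
def pvGroup (track : List (Int × Int × Int)) : PySem.Dict Int (List (Int × Int)) :=
  track.foldl (fun d t => d.insert t.1 (d.getD t.1 [] ++ [(t.2.1, t.2.2)])) PySem.Dict.empty

def gridlandMetro_alt (n : Int) (m : Int) (k : Int) (track : List (Int × Int × Int)) : Int :=
  n * m -
    (((pvGroup track).values.foldl
        (fun bl ivs => bl ++ pvBlocks (PySem.List.sorted ivs (fun iv => iv.1))) []).map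
      (fun bk => bk.2 - bk.1 + 1)).sum

-- ===== PRECONDITION & SPEC =====
def Spec_gridlandMetro (n : Int) (m : Int) (k : Int) (track : List (Int × Int × Int)) (out : Int) : Prop := out = gridlandMetro_alt n m k track
instance (n : Int) (m : Int) (k : Int) (track : List (Int × Int × Int)) (out : Int) : Decidable (Spec_gridlandMetro n m k track out) := by unfold Spec_gridlandMetro; infer_instance

-- ===== CLAIM (what is proved, stated in full; the proofs are below) =====
def Claim_equal_gridlandMetro : Prop := ∀ (n : Int) (m : Int) (k : Int) (track : List (Int × Int × Int)), Dom_gridlandMetro n m k track → Spec_gridlandMetro n m k track (gridlandMetro n m k track)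

-- ===== LEMMAS AND PROOFS =====

-- proof-side vocabulary: the comparators behind sorted2, the distinct rows, one row's intervals
def pvLexLt (a b : Int × Int × Int) : Bool :=
  decide (a.1 < b.1) || !decide (b.1 < a.1) && decide (a.2.1 < b.2.1)

def pvRowsOf (L : List (Int × Int × Int)) : List Int := PySem.List.dedup (L.map (fun t => t.1))

def pvIvsOf (r : Int) (L : List (Int × Int × Int)) : List (Int × Int) :=
  (L.filter (fun t => decide (t.1 = r))).map (fun t => (t.2.1, t.2.2))

-- A's per-row stack pass, as a function of the row's interval list
def pvRowA (l : List (Int × Int)) : Int :=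
  match l with
  | [] => 0
  | c :: rest => ((rest.foldl pvAStep [c]).map (fun e => e.2 - e.1 + 1)).sum

theorem sorted2_eq_foldl (L : List (Int × Int × Int)) :
    PySem.List.sorted2 L (fun t => t.1) (fun t => t.2.1) =
      L.foldl (fun acc x => PySem.List.insertBy pvLexLt x acc) [] := by
  rfl

theorem sorted_eq_foldl_start (L : List (Int × Int × Int)) :
    PySem.List.sorted L (fun t => t.2.1) =
      L.foldl (fun acc x => PySem.List.insertBy (fun a b => decide (a.2.1 < b.2.1)) x acc) [] := by
  rfl

-- ---- the group-by dict, characterised ----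

theorem pv_find_map (rs : List Int) (g : Int → List (Int × Int)) (r : Int) :
    List.find? (fun p => p.1 == r) (rs.map (fun r' => (r', g r'))) =
      if r ∈ rs then some (r, g r) else none := by
  induction rs with
  | nil => simp
  | cons a t ih =>
    by_cases h : a = r
    · subst h; simp
    · simp only [List.map_cons, List.find?_cons]
      have : ((a, g a).1 == r) = false := by simpa using h
      have hra : ¬ (r = a) := fun he => h he.symm
      simp [this, ih, hra]

theorem pv_dedup_append_singleton (xs : List Int) (x : Int) :
    PySem.List.dedup (xs ++ [x]) =
      if x ∈ xs then PySem.List.dedup xs else PySem.List.dedup xs ++ [x] := by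
  simp only [PySem.List.dedup, PySem.Set.ofList_eq_foldl, List.foldl_append, List.foldl_cons,
    List.foldl_nil]
  rw [show List.foldl PySem.Set.add [] xs = PySem.Set.ofList xs from
    (PySem.Set.ofList_eq_foldl xs).symm]
  by_cases h : x ∈ xs
  · have hc : PySem.Set.contains (PySem.Set.ofList xs) x = true := by
      simp [PySem.Set.mem_ofList, h]
    simp only [PySem.Set.add, hc, if_true, if_pos]
    rw [if_pos h]
  · have hc : PySem.Set.contains (PySem.Set.ofList xs) x = false := by
      simp [PySem.Set.mem_ofList, h]
    simp only [PySem.Set.add, hc, Bool.false_eq_true, if_false]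
    rw [if_neg h]

theorem pv_ivsOf_append (r : Int) (L1 L2 : List (Int × Int × Int)) :
    pvIvsOf r (L1 ++ L2) = pvIvsOf r L1 ++ pvIvsOf r L2 := by
  simp [pvIvsOf, List.filter_append]

theorem pv_dict_items (L : List (Int × Int × Int)) :
    (pvGroup L).items = (pvRowsOf L).map (fun r => (r, pvIvsOf r L)) := by
  induction L using List.reverseRecOn with
  | nil => simp [pvGroup, pvRowsOf, pvIvsOf, PySem.Dict.empty, PySem.List.dedup,
      PySem.Set.ofList]
  | append_singleton L t ih =>
    have hstep : pvGroup (L ++ [t]) =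
        (pvGroup L).insert t.1 ((pvGroup L).getD t.1 [] ++ [(t.2.1, t.2.2)]) := by
      simp [pvGroup, List.foldl_append]
    have hmemiff : t.1 ∈ pvRowsOf L ↔ t.1 ∈ L.map (fun t => t.1) := by
      simp only [pvRowsOf, PySem.List.mem_dedup]
    have hget : (pvGroup L).get? t.1 =
        if t.1 ∈ pvRowsOf L then some (pvIvsOf t.1 L) else none := by
      simp only [PySem.Dict.get?, ih, pv_find_map]
      split <;> rfl
    have hrows : pvRowsOf (L ++ [t]) =
        if t.1 ∈ L.map (fun t => t.1) then pvRowsOf L else pvRowsOf L ++ [t.1] := by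
      simp only [pvRowsOf, List.map_append, List.map_cons, List.map_nil]
      exact pv_dedup_append_singleton _ _
    have hivt : pvIvsOf t.1 (L ++ [t]) = pvIvsOf t.1 L ++ [(t.2.1, t.2.2)] := by
      rw [pv_ivsOf_append]; simp [pvIvsOf]
    have hivne : ∀ r, ¬ (t.1 = r) → pvIvsOf r (L ++ [t]) = pvIvsOf r L := by
      intro r hr; rw [pv_ivsOf_append]; simp [pvIvsOf, hr]
    by_cases hmem : t.1 ∈ pvRowsOf L
    · have hcont : (pvGroup L).contains t.1 = true := by
        simp only [PySem.Dict.contains, ih]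
        rw [List.any_eq_true]
        refine ⟨(t.1, pvIvsOf t.1 L), ?_, by simp⟩
        exact List.mem_map.2 ⟨t.1, hmem, rfl⟩
      have hgd : (pvGroup L).getD t.1 [] = pvIvsOf t.1 L := by
        simp [PySem.Dict.getD, hget, hmem]
      rw [hstep]
      simp only [PySem.Dict.insert, hcont, if_pos, hgd, ih]
      rw [hrows, if_pos (hmemiff.1 hmem), List.map_map]
      apply List.map_congr_left
      intro r hr
      by_cases h : r = t.1
      · subst h; simp [hivt]
      · have : ((r, pvIvsOf r L).1 == t.1) = false := by simpa using h
        simp only [Function.comp_apply, this, Bool.false_eq_true, if_false]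
        rw [hivne r (by exact fun he => h he.symm)]
    · have hcont : (pvGroup L).contains t.1 = false := by
        simp only [PySem.Dict.contains, ih]
        rw [Bool.eq_false_iff, Ne, List.any_eq_true]
        rintro ⟨p, hp, he⟩
        obtain ⟨r, hr, rfl⟩ := List.mem_map.1 hp
        simp only [beq_iff_eq] at he
        exact hmem (he ▸ hr)
      have hgd : (pvGroup L).getD t.1 [] = [] := by
        simp [PySem.Dict.getD, hget, hmem]
      have hiv0 : pvIvsOf t.1 L = [] := by
        simp only [pvIvsOf, List.map_eq_nil_iff, List.filter_eq_nil_iff]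
        intro a ha
        simp only [decide_eq_true_eq]
        intro he
        exact hmem (hmemiff.2 (List.mem_map.2 ⟨a, ha, he⟩))
      rw [hstep]
      simp only [PySem.Dict.insert, hcont, Bool.false_eq_true, if_false, hgd, ih]
      rw [hrows, if_neg (fun h => hmem (hmemiff.2 h)), List.map_append]
      congr 1
      · apply List.map_congr_left
        intro r hr
        have : ¬ (t.1 = r) := fun he => hmem (he ▸ hr)
        rw [hivne r this]
      · simp [hivt, hiv0]

-- ---- stable sort commutes with projecting to the interval pair ----

theorem pv_insertBy_map {α β : Type} (f : α → β) (before : β → β → Bool) (x : α) (ys : List α) :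
    PySem.List.insertBy before (f x) (ys.map f) =
      (PySem.List.insertBy (fun a b => before (f a) (f b)) x ys).map f := by
  induction ys with
  | nil => simp [PySem.List.insertBy]
  | cons y ys ih =>
    simp only [List.map_cons]
    by_cases h : before (f x) (f y)
    · simp [PySem.List.insertBy, h]
    · simp [PySem.List.insertBy, h, ih]

theorem pv_foldl_insertBy_map {α β : Type} (f : α → β) (before : β → β → Bool)
    (xs : List α) (acc : List α) :
    xs.foldl (fun acc x => PySem.List.insertBy before (f x) acc) (acc.map f) =
      (xs.foldl (fun acc x => PySem.List.insertBy (fun a b => before (f a) (f b)) x acc) acc).map f := by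
  induction xs generalizing acc with
  | nil => simp
  | cons x xs ih =>
    simp only [List.foldl_cons]
    rw [pv_insertBy_map, ih]

theorem sorted_map_iv (xs : List (Int × Int × Int)) :
    PySem.List.sorted (xs.map (fun t => (t.2.1, t.2.2))) (fun iv => iv.1) =
      (PySem.List.sorted xs (fun t => t.2.1)).map (fun t => (t.2.1, t.2.2)) := by
  show (xs.map (fun t => (t.2.1, t.2.2))).foldl
      (fun acc x => PySem.List.insertBy (fun a b => decide (a.1 < b.1)) x acc) [] = _
  rw [List.foldl_map]
  have := pv_foldl_insertBy_map (fun t : Int × Int × Int => (t.2.1, t.2.2))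
    (fun a b => decide (a.1 < b.1)) xs []
  simpa using this

-- ---- generic pairwise order of insertBy sorting ----

theorem pv_insertBy_pw {α : Type} (lt : α → α → Bool)
    (hasym : ∀ a b, lt a b = true → lt b a = false)
    (hcross : ∀ x y z, lt x y = true → lt z y = false → lt z x = false)
    (x : α) (S : List α) (hS : S.Pairwise (fun a b => lt b a = false)) :
    (PySem.List.insertBy lt x S).Pairwise (fun a b => lt b a = false) := by
  induction S with
  | nil => simp [PySem.List.insertBy]
  | cons y ys ih =>
    rw [List.pairwise_cons] at hS
    by_cases h : lt x y
    · simp only [PySem.List.insertBy, h, if_true]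
      refine List.Pairwise.cons ?_ (List.Pairwise.cons hS.1 hS.2)
      intro z hz
      rcases List.mem_cons.1 hz with rfl | hz'
      · exact hasym _ _ h
      · exact hcross _ _ _ h (hS.1 z hz')
    · simp only [PySem.List.insertBy, h, if_false]
      refine List.Pairwise.cons ?_ (ih hS.2)
      intro z hz
      rcases (PySem.List.mem_insertBy _ _ _ _).1 hz with rfl | hz'
      · simpa using h
      · exact hS.1 z hz'

theorem pv_foldl_insert_pw {α : Type} (lt : α → α → Bool)
    (hasym : ∀ a b, lt a b = true → lt b a = false)
    (hcross : ∀ x y z, lt x y = true → lt z y = false → lt z x = false)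
    (L : List α) (acc : List α) (hacc : acc.Pairwise (fun a b => lt b a = false)) :
    (L.foldl (fun acc x => PySem.List.insertBy lt x acc) acc).Pairwise
      (fun a b => lt b a = false) := by
  induction L generalizing acc with
  | nil => simpa
  | cons t L ih => exact ih _ (pv_insertBy_pw lt hasym hcross t acc hacc)

theorem sorted2_pairwise_lex (L : List (Int × Int × Int)) :
    (PySem.List.sorted2 L (fun t => t.1) (fun t => t.2.1)).Pairwise
      (fun a b => pvLexLt b a = false) := by
  rw [sorted2_eq_foldl]
  exact pv_foldl_insert_pw pvLexLt
    (by intro a b h; simp [pvLexLt] at *; omega)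
    (by intro x y z h1 h2; simp [pvLexLt] at *; omega)
    L [] (by simp)

-- ---- the lex order facts used by the per-row filter lemma ----

theorem pv_lex_row_lt {t y : Int × Int × Int} (h : pvLexLt t y = true) (hne : ¬ y.1 = t.1) :
    t.1 < y.1 := by
  simp [pvLexLt] at h
  omega

theorem pv_lex_eq_start {t y : Int × Int × Int} (h : t.1 = y.1) :
    pvLexLt t y = decide (t.2.1 < y.2.1) := by
  simp only [pvLexLt, h]
  simp

theorem pv_lex_true_of_row_lt {z y : Int × Int × Int} (h : z.1 < y.1) : pvLexLt z y = true := by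
  simp only [pvLexLt, Bool.or_eq_true, decide_eq_true_eq]
  omega

theorem pv_lex_false_not_row_lt {b t : Int × Int × Int} (h : pvLexLt b t = false) :
    ¬ b.1 < t.1 := by
  simp [pvLexLt] at h
  omega

-- ---- the crux: filtering one row out of a lex-ordered insertion ----

theorem pv_filter_insertBy (r : Int) (t : Int × Int × Int) (S : List (Int × Int × Int))
    (hS : S.Pairwise (fun a b => pvLexLt b a = false)) :
    (PySem.List.insertBy pvLexLt t S).filter (fun t => decide (t.1 = r)) =
      if t.1 = r then
        PySem.List.insertBy (fun a b => decide (a.2.1 < b.2.1)) t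
          (S.filter (fun t => decide (t.1 = r)))
      else S.filter (fun t => decide (t.1 = r)) := by
  induction S with
  | nil =>
    simp only [PySem.List.insertBy, List.filter_nil]
    by_cases h : t.1 = r <;> simp [PySem.List.insertBy, h]
  | cons y ys ih =>
    rw [List.pairwise_cons] at hS
    by_cases h : pvLexLt t y
    · simp only [PySem.List.insertBy, h, if_true]
      by_cases hpt : t.1 = r
      · by_cases hpy : y.1 = r
        · have hst : decide (t.2.1 < y.2.1) = true := by
            rw [← pv_lex_eq_start (by omega : t.1 = y.1)]; exact h
          simp [hpt, hpy, PySem.List.insertBy, hst]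
        · have hry : t.1 < y.1 := pv_lex_row_lt h (by omega)
          have hnil : ys.filter (fun t => decide (t.1 = r)) = [] := by
            rw [List.filter_eq_nil_iff]
            intro z hz
            simp only [decide_eq_true_eq]
            intro hzr
            have : pvLexLt z y = true := pv_lex_true_of_row_lt (by omega)
            rw [hS.1 z hz] at this
            exact absurd this (by simp)
          simp [hpt, hpy, hnil, PySem.List.insertBy]
      · simp [hpt]
    · have h' : pvLexLt t y = false := by simpa using h
      simp only [PySem.List.insertBy, h', Bool.false_eq_true, if_false]
      by_cases hpt : t.1 = r
      · by_cases hpy : y.1 = r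
        · have hst : decide (t.2.1 < y.2.1) = false := by
            rw [← pv_lex_eq_start (by omega : t.1 = y.1)]; simpa using h
          rw [if_pos hpt]
          have hfy : List.filter (fun t => decide (t.1 = r)) (y :: ys) =
              y :: List.filter (fun t => decide (t.1 = r)) ys := by simp [hpy]
          rw [hfy]
          have hfl : List.filter (fun t => decide (t.1 = r))
              (y :: PySem.List.insertBy pvLexLt t ys) =
              y :: List.filter (fun t => decide (t.1 = r)) (PySem.List.insertBy pvLexLt t ys) := by
            simp [hpy]
          rw [hfl, ih hS.2, if_pos hpt]
          simp [PySem.List.insertBy, hst]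
        · simp only [List.filter_cons]
          simp [hpy, hpt, ih hS.2]
      · rw [if_neg hpt, List.filter_cons, List.filter_cons]
        have := ih hS.2
        rw [if_neg hpt] at this
        rw [this]

theorem pv_sorted_append_singleton (M : List (Int × Int × Int)) (t : Int × Int × Int) :
    PySem.List.sorted (M ++ [t]) (fun t => t.2.1) =
      PySem.List.insertBy (fun a b => decide (a.2.1 < b.2.1)) t
        (PySem.List.sorted M (fun t => t.2.1)) := by
  rw [sorted_eq_foldl_start, sorted_eq_foldl_start, List.foldl_append]
  rfl

theorem filter_sorted2 (r : Int) (L : List (Int × Int × Int)) :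
    (PySem.List.sorted2 L (fun t => t.1) (fun t => t.2.1)).filter (fun t => decide (t.1 = r)) =
      PySem.List.sorted (L.filter (fun t => decide (t.1 = r))) (fun t => t.2.1) := by
  induction L using List.reverseRecOn with
  | nil => rfl
  | append_singleton L t ih =>
    have e1 : PySem.List.sorted2 (L ++ [t]) (fun t => t.1) (fun t => t.2.1) =
        PySem.List.insertBy pvLexLt t (PySem.List.sorted2 L (fun t => t.1) (fun t => t.2.1)) := by
      rw [sorted2_eq_foldl, List.foldl_append, ← sorted2_eq_foldl]
      rfl
    rw [e1, pv_filter_insertBy r t _ (sorted2_pairwise_lex L), ih]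
    by_cases hpt : t.1 = r
    · rw [if_pos hpt]
      have e2 : (L ++ [t]).filter (fun t => decide (t.1 = r)) =
          L.filter (fun t => decide (t.1 = r)) ++ [t] := by
        simp [List.filter_append, hpt]
      rw [e2, pv_sorted_append_singleton]
    · rw [if_neg hpt]
      have e2 : (L ++ [t]).filter (fun t => decide (t.1 = r)) =
          L.filter (fun t => decide (t.1 = r)) := by
        simp [List.filter_append, hpt]
      rw [e2]

-- ---- decomposing A's outer loop over the row groups ----

theorem pv_innerA_spec (row : Int) (stack : List (Int × Int)) (A B : List (Int × Int × Int))
    (hA : ∀ x ∈ A, x.1 = row) (hB : ∀ b B', B = b :: B' → ¬ b.1 = row) :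
    pvInnerA row stack (A ++ B) =
      (A.foldl (fun st x => pvAStep st (x.2.1, x.2.2)) stack, B) := by
  induction A generalizing stack with
  | nil =>
    cases B with
    | nil => simp [pvInnerA]
    | cons b B' => simp [pvInnerA, hB b B' rfl]
  | cons a A ih =>
    simp only [List.cons_append, pvInnerA, hA a (by simp), if_true, List.foldl_cons]
    exact ih _ (fun x hx => hA x (by simp [hx]))

theorem pv_foldl_add_all_eq (xs : List Int) (s : List Int) (r : Int)
    (h : ∀ x ∈ xs, x = r) (hr : r ∈ s) : List.foldl PySem.Set.add s xs = s := by
  induction xs with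
  | nil => rfl
  | cons x t ih =>
    have hx : x = r := h x (by simp)
    subst hx
    have hc : PySem.Set.contains s x = true := by
      simp [PySem.Set.contains, hr]
    simp only [List.foldl_cons, PySem.Set.add, hc, if_true]
    exact ih (fun y hy => h y (by simp [hy]))

theorem pv_foldl_add_cons_notmem (ys : List Int) : ∀ (s : List Int) (r : Int), r ∉ ys →
    List.foldl PySem.Set.add (r :: s) ys = r :: List.foldl PySem.Set.add s ys := by
  induction ys with
  | nil => intro s r _; rfl
  | cons y ys ih =>
    intro s r hr
    have hy : ¬ (y = r) := fun he => hr (by simp [he])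
    have hcc : PySem.Set.contains (r :: s) y = PySem.Set.contains s y := by
      simp [PySem.Set.contains, hy]
    simp only [List.foldl_cons, PySem.Set.add, hcc]
    by_cases hc : PySem.Set.contains s y = true
    · simp only [hc, if_true]
      exact ih s r (fun h => hr (by simp [h]))
    · simp only [hc, Bool.false_eq_true, if_false]
      rw [show (r :: s) ++ [y] = r :: (s ++ [y]) from rfl]
      exact ih (s ++ [y]) r (fun h => hr (by simp [h]))

theorem pv_rowsOf_decomp (t : Int × Int × Int) (A B : List (Int × Int × Int))
    (hA : ∀ x ∈ A, x.1 = t.1) (hB : t.1 ∉ B.map (fun z => z.1)) :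
    pvRowsOf (t :: A ++ B) = t.1 :: pvRowsOf B := by
  simp only [pvRowsOf, PySem.List.dedup, PySem.Set.ofList_eq_foldl, List.map_cons,
    List.map_append, List.foldl_cons, List.foldl_append]
  have e0 : PySem.Set.add [] t.1 = [t.1] := rfl
  rw [e0, pv_foldl_add_all_eq (A.map (fun z => z.1)) [t.1] t.1
    (by intro x hx; obtain ⟨z, hz, rfl⟩ := List.mem_map.1 hx; exact hA z hz) (by simp)]
  exact pv_foldl_add_cons_notmem (B.map (fun z => z.1)) [] t.1 hB

theorem pv_outerA_decomp : ∀ (N : Nat) (S : List (Int × Int × Int)), S.length ≤ N →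
    S.Pairwise (fun a b => pvLexLt b a = false) →
    pvOuterA S = ((pvRowsOf S).map (fun r => pvRowA (pvIvsOf r S))).sum := by
  intro N
  induction N with
  | zero =>
    intro S hlen _
    have : S = [] := List.eq_nil_of_length_eq_zero (Nat.le_zero.1 hlen)
    subst this
    simp [pvOuterA, pvRowsOf, PySem.List.dedup, PySem.Set.ofList]
  | succ N ih =>
    intro S hlen hpw
    cases S with
    | nil => simp [pvOuterA, pvRowsOf, PySem.List.dedup, PySem.Set.ofList]
    | cons t rest =>
      rw [List.pairwise_cons] at hpw
      set q : (Int × Int × Int) → Bool := fun x => decide (x.1 = t.1) with hq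
      have hAB : rest.takeWhile q ++ rest.dropWhile q = rest := List.takeWhile_append_dropWhile
      set A := rest.takeWhile q with hAdef
      set B := rest.dropWhile q with hBdef
      have hA : ∀ x ∈ A, x.1 = t.1 := by
        intro x hx
        have := List.mem_takeWhile_imp hx
        simpa [hq] using this
      have hBsub : B.Sublist rest := List.dropWhile_sublist q
      have hBgt : ∀ z ∈ B, t.1 < z.1 := by
        cases hBe : B with
        | nil => simp
        | cons b B' =>
          have hbq : q b = false := by
            have := List.head?_dropWhile_not q rest
            rw [← hBdef, hBe] at this
            simpa using this
          have hbne : ¬ (b.1 = t.1) := by simpa [hq] using hbq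
          have hbmem : b ∈ rest := hBsub.mem (by simp [hBe])
          have hbt : t.1 < b.1 := by
            have h1 := hpw.1 b hbmem
            have h2 := pv_lex_false_not_row_lt h1
            omega
          intro z hz
          rcases List.mem_cons.1 hz with rfl | hz'
          · exact hbt
          · have hBpw : B.Pairwise (fun a b => pvLexLt b a = false) := List.Pairwise.sublist hBsub hpw.2
            rw [hBe, List.pairwise_cons] at hBpw
            have := pv_lex_false_not_row_lt (hBpw.1 z hz')
            omega
      have hBne : ∀ b B', B = b :: B' → ¬ b.1 = t.1 := by
        intro b B' hb
        have : t.1 < b.1 := hBgt b (by simp [hb])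
        omega
      have hinner := pv_innerA_spec t.1 [(t.2.1, t.2.2)] A B hA hBne
      have houter : pvOuterA (t :: rest) =
          ((A.foldl (fun st x => pvAStep st (x.2.1, x.2.2)) [(t.2.1, t.2.2)]).map
            (fun e => e.2 - e.1 + 1)).sum + pvOuterA B := by
        rw [pvOuterA]
        conv_lhs => rw [show rest = A ++ B from hAB.symm]
        rw [hinner]
        dsimp only
        rw [PySem.List.foldl_add]
        simp
      have hfiltA : A.filter (fun x => decide (x.1 = t.1)) = A := by
        rw [List.filter_eq_self]
        intro x hx; simpa using hA x hx
      have hfiltB : B.filter (fun x => decide (x.1 = t.1)) = [] := by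
        rw [List.filter_eq_nil_iff]
        intro z hz
        have := hBgt z hz
        simp only [decide_eq_true_eq]
        omega
      have hivt : pvIvsOf t.1 (t :: rest) = (t.2.1, t.2.2) :: A.map (fun x => (x.2.1, x.2.2)) := by
        rw [show rest = A ++ B from hAB.symm]
        simp only [pvIvsOf, List.filter_cons, List.filter_append, hfiltA, hfiltB,
          decide_eq_true_eq]
        simp
      have hrowA : pvRowA (pvIvsOf t.1 (t :: rest)) =
          ((A.foldl (fun st x => pvAStep st (x.2.1, x.2.2)) [(t.2.1, t.2.2)]).map
            (fun e => e.2 - e.1 + 1)).sum := by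
        rw [hivt]
        simp only [pvRowA]
        rw [List.foldl_map]
      have hrows : pvRowsOf (t :: rest) = t.1 :: pvRowsOf B := by
        rw [show rest = A ++ B from hAB.symm]
        exact pv_rowsOf_decomp t A B hA (by
          intro hmem
          obtain ⟨z, hz, he⟩ := List.mem_map.1 hmem
          have := hBgt z hz
          omega)
      have hivB : ∀ r ∈ pvRowsOf B, pvIvsOf r (t :: rest) = pvIvsOf r B := by
        intro r hr
        have hrB : r ∈ B.map (fun z => z.1) := by
          simpa [pvRowsOf, PySem.List.mem_dedup] using hr
        obtain ⟨z, hz, he⟩ := List.mem_map.1 hrB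
        have hrgt : t.1 < r := he ▸ hBgt z hz
        rw [show rest = A ++ B from hAB.symm]
        simp only [pvIvsOf, List.filter_cons, List.filter_append, decide_eq_true_eq]
        have h1 : ¬ (t.1 = r) := by omega
        have h2 : A.filter (fun x => decide (x.1 = r)) = [] := by
          rw [List.filter_eq_nil_iff]
          intro x hx
          have := hA x hx
          simp only [decide_eq_true_eq]
          omega
        simp [h1, h2]
      have hlenB : B.length ≤ N := by
        have h1 : B.length ≤ rest.length := hBsub.length_le
        simp only [List.length_cons] at hlen
        omega
      have hihB := ih B hlenB (List.Pairwise.sublist hBsub hpw.2)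
      have hcongr : (pvRowsOf B).map (fun r => pvRowA (pvIvsOf r (t :: rest))) =
          (pvRowsOf B).map (fun r => pvRowA (pvIvsOf r B)) :=
        List.map_congr_left (fun r hr => by rw [hivB r hr])
      rw [houter, hihB, hrows]
      simp only [List.map_cons, List.sum_cons]
      rw [hrowA, hcongr]

-- ---- A's stack merge equals B's block peeling on a start-sorted list ----

theorem pv_fold_blocks : ∀ (rest : List (Int × Int)) (s e : Int) (bot : List (Int × Int)),
    (∀ iv ∈ rest, s ≤ iv.1) → rest.Pairwise (fun a b => a.1 ≤ b.1) →
    ((rest.foldl pvAStep ((s, e) :: bot)).map (fun bk => bk.2 - bk.1 + 1)).sum =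
      ((pvBlocks ((s, e) :: rest)).map (fun bk => bk.2 - bk.1 + 1)).sum +
        (bot.map (fun bk => bk.2 - bk.1 + 1)).sum := by
  intro rest
  induction rest with
  | nil =>
    intro s e bot _ _
    simp only [List.foldl_nil, pvBlocks, pvConsume, List.map_cons, List.sum_cons,
      List.map_nil, List.sum_nil]
    ring
  | cons c rest ih =>
    intro s e bot h1 h2
    obtain ⟨c1, c2⟩ := c
    rw [List.pairwise_cons] at h2
    have hs : s ≤ c1 := h1 (c1, c2) (by simp)
    by_cases hc : c1 ≤ e ∨ (s ≤ c2 ∧ c2 ≤ e)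
    · have hcondA : (((s, e) : Int × Int).1 ≤ ((c1, c2) : Int × Int).1 ∧
          ((c1, c2) : Int × Int).1 ≤ ((s, e) : Int × Int).2) ∨
          (((c1, c2) : Int × Int).2 ≤ ((s, e) : Int × Int).2 ∧
            ((s, e) : Int × Int).1 ≤ ((c1, c2) : Int × Int).2) := by
        dsimp only
        rcases hc with h | h
        · exact Or.inl ⟨hs, h⟩
        · exact Or.inr ⟨h.2, h.1⟩
      have hstep : pvAStep ((s, e) :: bot) (c1, c2) =
          (s, if e < c2 then c2 else e) :: bot := by
        simp only [pvAStep, if_pos hcondA]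
        split_ifs <;> rfl
      have hblocks : pvBlocks ((s, e) :: (c1, c2) :: rest) =
          pvBlocks ((s, if e < c2 then c2 else e) :: rest) := by
        conv_lhs => rw [pvBlocks]
        conv_rhs => rw [pvBlocks]
        simp only [pvConsume, if_pos hc]
      rw [List.foldl_cons, hstep, hblocks,
        ih s (if e < c2 then c2 else e) bot (fun iv hiv => h1 iv (by simp [hiv])) h2.2]
    · have hcondA : ¬ ((((s, e) : Int × Int).1 ≤ ((c1, c2) : Int × Int).1 ∧
          ((c1, c2) : Int × Int).1 ≤ ((s, e) : Int × Int).2) ∨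
          (((c1, c2) : Int × Int).2 ≤ ((s, e) : Int × Int).2 ∧
            ((s, e) : Int × Int).1 ≤ ((c1, c2) : Int × Int).2)) := by
        dsimp only
        push_neg at hc ⊢
        constructor
        · intro _; omega
        · intro h; omega
      have hstep : pvAStep ((s, e) :: bot) (c1, c2) = (c1, c2) :: (s, e) :: bot := by
        simp only [pvAStep, if_neg hcondA]
      have hblocks : pvBlocks ((s, e) :: (c1, c2) :: rest) =
          (s, e) :: pvBlocks ((c1, c2) :: rest) := by
        conv_lhs => rw [pvBlocks]
        simp only [pvConsume, if_neg hc]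
      rw [List.foldl_cons, hstep, hblocks,
        ih c1 c2 ((s, e) :: bot) (fun iv hiv => h2.1 iv hiv) h2.2]
      simp only [List.map_cons, List.sum_cons]
      ring

theorem pv_rowA_blocks (l : List (Int × Int)) (hp : l.Pairwise (fun a b => a.1 ≤ b.1)) :
    pvRowA l = ((pvBlocks l).map (fun bk => bk.2 - bk.1 + 1)).sum := by
  cases l with
  | nil => simp [pvRowA, pvBlocks]
  | cons c rest =>
    obtain ⟨s, e⟩ := c
    rw [List.pairwise_cons] at hp
    have := pv_fold_blocks rest s e [] (fun iv hiv => hp.1 iv hiv) hp.2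
    simpa [pvRowA] using this

-- ---- B's flat block accumulation, row by row ----

theorem pv_blocks_flat (rows : List (List (Int × Int))) (b : List (Int × Int)) :
    ((rows.foldl (fun bl ivs => bl ++ pvBlocks (PySem.List.sorted ivs (fun iv => iv.1))) b).map
        (fun bk => bk.2 - bk.1 + 1)).sum =
      (b.map (fun bk => bk.2 - bk.1 + 1)).sum +
        (rows.map (fun ivs => ((pvBlocks (PySem.List.sorted ivs (fun iv => iv.1))).map
          (fun bk => bk.2 - bk.1 + 1)).sum)).sum := by
  induction rows generalizing b with
  | nil => simp
  | cons r rows ih =>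
    simp only [List.foldl_cons, List.map_cons, List.sum_cons]
    rw [ih]
    simp only [List.map_append, List.sum_append]
    ring

-- ===== VERDICT (by name: the statement is the Claim_ definition above) =====
theorem gridlandMetro_spec : Claim_equal_gridlandMetro := by
  intro n m k track _
  unfold Spec_gridlandMetro gridlandMetro gridlandMetro_alt
  have hvals : (pvGroup track).values =
      (pvRowsOf track).map (fun r => pvIvsOf r track) := by
    simp [PySem.Dict.values, pv_dict_items, List.map_map, Function.comp]
  rw [hvals, pv_blocks_flat]
  set S := PySem.List.sorted2 track (fun t => t.1) (fun t => t.2.1) with hS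
  rw [pv_outerA_decomp S.length S (le_refl _) (sorted2_pairwise_lex track)]
  have hsummand : ∀ r ∈ pvRowsOf S,
      pvRowA (pvIvsOf r S) =
        ((pvBlocks (PySem.List.sorted (pvIvsOf r track) (fun iv => iv.1))).map
          (fun bk => bk.2 - bk.1 + 1)).sum := by
    intro r _
    have hsortrow : pvIvsOf r S = PySem.List.sorted (pvIvsOf r track) (fun iv => iv.1) := by
      show (S.filter (fun t => decide (t.1 = r))).map (fun t => (t.2.1, t.2.2)) = _
      rw [hS, filter_sorted2 r track, ← sorted_map_iv]
      rfl
    rw [pv_rowA_blocks (pvIvsOf r S) (by rw [hsortrow]; exact PySem.List.sorted_pairwise _ _),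
      hsortrow]
  have hmapeq : (pvRowsOf S).map (fun r => pvRowA (pvIvsOf r S)) =
      (pvRowsOf S).map (fun r =>
        ((pvBlocks (PySem.List.sorted (pvIvsOf r track) (fun iv => iv.1))).map
          (fun bk => bk.2 - bk.1 + 1)).sum) :=
    List.map_congr_left hsummand
  rw [hmapeq]
  have hperm : (pvRowsOf S).Perm (pvRowsOf track) := by
    apply (List.perm_ext_iff_of_nodup (PySem.List.nodup_dedup _) (PySem.List.nodup_dedup _)).2
    intro a
    simp only [PySem.List.mem_dedup, List.mem_map]
    constructor
    · rintro ⟨z, hz, rfl⟩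
      exact ⟨z, (PySem.List.sorted2_perm track _ _ _).mem_iff.1 hz, rfl⟩
    · rintro ⟨z, hz, rfl⟩
      exact ⟨z, (PySem.List.sorted2_perm track _ _ _).mem_iff.2 hz, rfl⟩
  have hsum := (hperm.map (fun r =>
      ((pvBlocks (PySem.List.sorted (pvIvsOf r track) (fun iv => iv.1))).map
        (fun bk => bk.2 - bk.1 + 1)).sum)).sum_eq
  rw [hsum, List.map_map]
  show _ = n * m - (0 + ((pvRowsOf track).map _).sum)
  rw [Function.comp_def]
  ring
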